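-- pv_equiv track=rewrite | github.com/mistakeknot/nartopo-tools | scripts/semantic_map_reduce.py | validate_snippet_ids
-- ===== SOURCE A (Python) =====
-- from typing import Any
--
-- def ordered_dedupe(items: list[str]) -> list[str]:
--     seen = set()
--     ordered = []
--     for item in items:
--         if item in seen:
--             continue
--         seen.add(item)
--         ordered.append(item)
--     return ordered
--
-- def validate_snippet_ids(snippet_ids: Any, allowed_snippet_ids: set[str]) -> list[str]:
--     if not isinstance(snippet_ids, list) or not snippet_ids:
--         raise ValueError("Record missing snippet_ids")
--     normalized = ordered_dedupe(
--         [snippet_id.strip() for snippet_id in snippet_ids if isinstance(snippet_id, str) and snippet_id.strip()]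
--     )
--     if not normalized:
--         raise ValueError("Record missing snippet_ids")
--     if not set(normalized).issubset(allowed_snippet_ids):
--         raise ValueError("Record references unknown snippet_ids")
--     return normalized
-- ===== SOURCE B (Python) =====
-- def validate_snippet_ids(snippet_ids, allowed_snippet_ids):
--     if not isinstance(snippet_ids, list) or not snippet_ids:
--         raise ValueError("Record missing snippet_ids")
--     seen = set()
--     result = []
--     for item in snippet_ids:
--         if not isinstance(item, str):
--             continue
--         t = item.strip()
--         if not t or t in seen:
--             continue
--         if t not in allowed_snippet_ids:
--             raise ValueError("Record references unknown snippet_ids")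
--         seen.add(t)
--         result.append(t)
--     if not result:
--         raise ValueError("Record missing snippet_ids")
--     return result
-- ===== Notes on version B (the rewrite author's own statement) =====
-- stated objective: simpler
-- what changed: Replaces A's three-stage pipeline (normalize comprehension, ordered_dedupe helper, set-subset check) with one fused loop over snippet_ids that strips, skips empties and seen duplicates, and checks each new id against allowed_snippet_ids inline, raising immediately on an unknown id; the helper function and the intermediate list/set builds disappear.
import Mathlib
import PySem

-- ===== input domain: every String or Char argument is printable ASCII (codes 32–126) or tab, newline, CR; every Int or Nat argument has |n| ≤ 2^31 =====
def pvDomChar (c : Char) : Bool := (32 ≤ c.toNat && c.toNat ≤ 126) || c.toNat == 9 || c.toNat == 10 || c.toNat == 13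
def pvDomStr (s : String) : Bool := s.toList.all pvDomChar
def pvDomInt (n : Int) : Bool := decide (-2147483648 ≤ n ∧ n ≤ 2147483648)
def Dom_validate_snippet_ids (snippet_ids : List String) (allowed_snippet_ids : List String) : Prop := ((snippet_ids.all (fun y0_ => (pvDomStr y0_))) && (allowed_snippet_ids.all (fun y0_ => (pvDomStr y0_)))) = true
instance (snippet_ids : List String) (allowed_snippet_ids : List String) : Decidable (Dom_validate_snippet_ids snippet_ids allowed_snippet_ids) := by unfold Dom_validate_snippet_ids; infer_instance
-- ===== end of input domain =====

-- ===== PORT A =====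
-- B fuses A's normalize/dedupe/subset pipeline into one pass; all three raise paths are excluded by Pre_.
-- A's dedupe loop body, named so the proofs can refer to it
def ddStep : PySem.Set String × List String → String → PySem.Set String × List String :=
  fun st item =>
    if PySem.Set.contains st.1 item then st
    else (PySem.Set.add st.1 item, st.2 ++ [item])

-- A's ordered_dedupe helper: a seen-set + ordered-list fold
def ordered_dedupe (items : List String) : List String :=
  (items.foldl ddStep (PySem.Set.empty, [])).2

def validate_snippet_ids (snippet_ids : List String) (allowed_snippet_ids : List String) : List String :=
  if snippet_ids = [] then []   -- Python: raise ValueError("Record missing snippet_ids"); outside Pre_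
  else
    let normalized := ordered_dedupe
      ((snippet_ids.filter (fun s => PySem.Str.strip s ≠ "")).map (fun s => PySem.Str.strip s))
    if normalized = [] then []  -- raise "Record missing snippet_ids"; outside Pre_
    else if PySem.Set.issubset (PySem.Set.ofList normalized) allowed_snippet_ids then normalized
    else []                     -- raise "Record references unknown snippet_ids"; outside Pre_

-- ===== PORT B =====
-- the single fused loop of Source B; 'none' = the inline raise on an unknown id
def vsScan (allowed : List String) : List String → PySem.Set String → List String → Option (List String)
  | [], _, acc => some acc
  | item :: rest, seen, acc =>
    let t := PySem.Str.strip item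
    if t = "" then vsScan allowed rest seen acc
    else if PySem.Set.contains seen t then vsScan allowed rest seen acc
    else if allowed.contains t then vsScan allowed rest (PySem.Set.add seen t) (acc ++ [t])
    else none

def validate_snippet_ids_alt (snippet_ids : List String) (allowed_snippet_ids : List String) : List String :=
  if snippet_ids = [] then []   -- raise "Record missing snippet_ids"; outside Pre_
  else
    match vsScan allowed_snippet_ids snippet_ids PySem.Set.empty [] with
    | none => []                -- raise "Record references unknown snippet_ids"; outside Pre_
    | some result => if result = [] then [] else result  -- raise "Record missing snippet_ids" when empty

-- ===== PRECONDITION & SPEC =====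
-- Pre_ admits exactly the inputs on which A returns: some element strips to a nonempty id,
-- and every nonempty stripped id belongs to allowed_snippet_ids (otherwise A raises ValueError).
def Pre_validate_snippet_ids (snippet_ids : List String) (allowed_snippet_ids : List String) : Prop :=
  (∃ s ∈ snippet_ids, PySem.Str.strip s ≠ "") ∧
  (∀ s ∈ snippet_ids, PySem.Str.strip s ≠ "" → allowed_snippet_ids.contains (PySem.Str.strip s) = true)
instance (snippet_ids : List String) (allowed_snippet_ids : List String) : Decidable (Pre_validate_snippet_ids snippet_ids allowed_snippet_ids) := by unfold Pre_validate_snippet_ids; infer_instance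

def pvWitness_validate_snippet_ids : List String × List String := (["a", " b "], ["a", "b"])

def Spec_validate_snippet_ids (snippet_ids : List String) (allowed_snippet_ids : List String) (out : List String) : Prop := out = validate_snippet_ids_alt snippet_ids allowed_snippet_ids
instance (snippet_ids : List String) (allowed_snippet_ids : List String) (out : List String) : Decidable (Spec_validate_snippet_ids snippet_ids allowed_snippet_ids out) := by unfold Spec_validate_snippet_ids; infer_instance

-- ===== CLAIM (what is proved, stated in full; the proofs are below) =====
def Claim_equal_validate_snippet_ids : Prop := ∀ (snippet_ids : List String) (allowed_snippet_ids : List String), Dom_validate_snippet_ids snippet_ids allowed_snippet_ids → Pre_validate_snippet_ids snippet_ids allowed_snippet_ids → Spec_validate_snippet_ids snippet_ids allowed_snippet_ids (validate_snippet_ids snippet_ids allowed_snippet_ids)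

-- ===== LEMMAS AND PROOFS =====
lemma scan_eq_fold (allowed : List String) :
    ∀ (ids : List String) (seen : PySem.Set String) (acc : List String),
    (∀ s ∈ ids, PySem.Str.strip s ≠ "" → allowed.contains (PySem.Str.strip s) = true) →
    vsScan allowed ids seen acc =
      some (((ids.filter (fun s => PySem.Str.strip s ≠ "")).map (fun s => PySem.Str.strip s)).foldl
        ddStep (seen, acc)).2 := by
  intro ids
  induction ids with
  | nil => intro seen acc _; simp [vsScan]
  | cons x rest ih =>
    intro seen acc h
    have ih' := fun seen acc => ih seen acc (fun s hs => h s (List.mem_cons_of_mem _ hs))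
    by_cases hx : PySem.Str.strip x = ""
    · simp [vsScan, hx, ih']
    · have hall : PySem.Str.strip x ∈ allowed := by
        simpa using h x (List.mem_cons_self ..) hx
      by_cases hseen : PySem.Str.strip x ∈ seen
      · simp [vsScan, hx, hseen, ddStep, ih']
      · simp [vsScan, hx, hseen, hall, ddStep, ih']

lemma fold_acc_prefix :
    ∀ (items : List String) (seen : PySem.Set String) (acc : List String),
    ∃ t, (items.foldl ddStep (seen, acc)).2 = acc ++ t := by
  intro items
  induction items with
  | nil => intro seen acc; exact ⟨[], by simp⟩
  | cons x rest ih =>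
    intro seen acc
    by_cases hx : x ∈ seen
    · simpa [List.foldl_cons, ddStep, hx] using ih seen acc
    · obtain ⟨t, ht⟩ := ih (PySem.Set.add seen x) (acc ++ [x])
      refine ⟨x :: t, ?_⟩
      rw [List.foldl_cons]
      simp only [ddStep]
      rw [if_neg (by simpa [PySem.Set.contains] using hx)]
      rw [ht]; simp

lemma fold_snd_ne_nil (items : List String) (seen : PySem.Set String) (acc : List String)
    (hacc : acc ≠ []) : (items.foldl ddStep (seen, acc)).2 ≠ [] := by
  obtain ⟨t, ht⟩ := fold_acc_prefix items seen acc
  simp [ht, hacc]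

lemma fold_mem :
    ∀ (items : List String) (seen : PySem.Set String) (acc : List String) (x : String),
    x ∈ (items.foldl ddStep (seen, acc)).2 → x ∈ acc ∨ x ∈ items := by
  intro items
  induction items with
  | nil => intro seen acc x hx; simp at hx; exact Or.inl hx
  | cons y rest ih =>
    intro seen acc x hx
    by_cases hy : y ∈ seen
    · simp only [List.foldl_cons, ddStep] at hx
      rw [if_pos (by simpa [PySem.Set.contains] using hy)] at hx
      rcases ih seen acc x hx with h | h
      · exact Or.inl h
      · exact Or.inr (List.mem_cons_of_mem _ h)
    · simp only [List.foldl_cons, ddStep] at hx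
      rw [if_neg (by simpa [PySem.Set.contains] using hy)] at hx
      rcases ih _ _ x hx with h | h
      · rcases List.mem_append.mp h with h | h
        · exact Or.inl h
        · simp at h; exact Or.inr (by simp [h])
      · exact Or.inr (List.mem_cons_of_mem _ h)

-- ===== VERDICT (by name: the statement is the Claim_ definition above) =====
theorem validate_snippet_ids_spec : Claim_equal_validate_snippet_ids := by
  intro ids allowed _ hpre
  obtain ⟨⟨s0, hs0mem, hs0⟩, hsub⟩ := hpre
  have hne : ids ≠ [] := by rintro rfl; simp at hs0mem
  unfold Spec_validate_snippet_ids validate_snippet_ids validate_snippet_ids_alt ordered_dedupe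
  rw [if_neg hne, if_neg hne, scan_eq_fold allowed ids PySem.Set.empty [] hsub]
  set mapped := (ids.filter (fun s => PySem.Str.strip s ≠ "")).map (fun s => PySem.Str.strip s) with hm
  have hmem : PySem.Str.strip s0 ∈ mapped := by
    rw [hm]
    exact List.mem_map_of_mem (List.mem_filter.mpr ⟨hs0mem, decide_eq_true hs0⟩)
  have hmapne : mapped ≠ [] := by rintro h; rw [h] at hmem; simp at hmem
  obtain ⟨x, rest, hxr⟩ := List.exists_cons_of_ne_nil hmapne
  have hnormne : (mapped.foldl ddStep (PySem.Set.empty, [])).2 ≠ [] := by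
    rw [hxr, List.foldl_cons, ← Prod.mk.eta (p := ddStep (PySem.Set.empty, []) x)]
    apply fold_snd_ne_nil
    simp [ddStep, PySem.Set.empty, PySem.Set.add, PySem.Set.contains]
  have hsub2 : ∀ y ∈ (mapped.foldl ddStep (PySem.Set.empty, [])).2, y ∈ allowed := by
    intro y hy
    rcases fold_mem mapped PySem.Set.empty [] y hy with h | h
    · simp at h
    · rw [hm] at h
      obtain ⟨s, hsmem, rfl⟩ := List.mem_map.mp h
      have hf := List.mem_filter.mp hsmem
      simpa using hsub s hf.1 (by simpa using hf.2)
  simp only [PySem.Set.empty] at hnormne hsub2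
  simp [hnormne]
  exact hsub2
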